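-- pv_equiv track=rewrite | github.com/sasha-tsepilova/puzzle | puzzle.py | validate_rows
-- ===== SOURCE A (Python) =====
-- def validate_rows(board: list):
--     '''
--     Gets board configuration and returns True if all rows has not repeating
--     numbers
--     >>> validate_rows(["**** ****",\
--  "***1 ****",\
--  "**  3****",\
--  "* 4 1****",\
--  "     9 5 ",\
--  " 6  83  *",\
--  "3   1  **",\
--  "  8  2***",\
--  "  2  ****"])
--     True
--     '''
--     for row in board:
--         numbers = set()
--         for element in row:
--             if element not in('*', ' '):
--                 if element in numbers:
--                     return False
--                 numbers.add(element)
--     return True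
-- ===== SOURCE B (Python) =====
-- def validate_rows(board: list):
--     '''
--     Gets board configuration and returns True if all rows has not repeating
--     numbers.  Sort-then-adjacent-scan strategy: per row, sort the non-'*',
--     non-' ' characters; a repeat exists iff two equal characters end up
--     adjacent in the sorted list.
--     '''
--     for row in board:
--         digits = sorted(c for c in row if c not in ('*', ' '))
--         for a, b in zip(digits, digits[1:]):
--             if a == b:
--                 return False
--     return True
-- ===== Notes on version B (the rewrite author's own statement) =====
-- stated objective: alternative
-- what changed: Replaces A's incremental seen-set with membership test by a sort-then-adjacent-scan per row: sort the row's non-'*', non-' ' characters and report a repeat iff two adjacent sorted characters are equal.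
import Mathlib
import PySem

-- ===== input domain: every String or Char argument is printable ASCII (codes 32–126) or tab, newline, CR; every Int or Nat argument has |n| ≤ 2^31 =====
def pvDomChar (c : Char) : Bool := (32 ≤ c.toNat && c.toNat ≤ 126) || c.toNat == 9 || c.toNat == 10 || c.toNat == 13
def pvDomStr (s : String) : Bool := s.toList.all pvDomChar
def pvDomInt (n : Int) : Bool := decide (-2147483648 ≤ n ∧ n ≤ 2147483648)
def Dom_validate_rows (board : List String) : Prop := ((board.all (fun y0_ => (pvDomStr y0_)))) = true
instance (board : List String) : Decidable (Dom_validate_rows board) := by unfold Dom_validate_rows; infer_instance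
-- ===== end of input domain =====

-- B replaces A's per-row incremental seen-set by sort-then-adjacent-scan; equal return value, no speed claim.

-- ===== PORT A =====
-- inner loop of A: 'for element in row: …' with the per-row seen-set 'numbers'
def pvRowLoopA (cs : List Char) (numbers : PySem.Set Char) : Bool :=
  match cs with
  | [] => true
  | c :: rest =>
    if ¬ (c = '*' ∨ c = ' ') then
      if PySem.Set.contains numbers c then false
      else pvRowLoopA rest (PySem.Set.add numbers c)
    else pvRowLoopA rest numbers

def validate_rows (board : List String) : Bool :=
  match board with
  | [] => true
  | row :: rest =>
    if pvRowLoopA row.toList PySem.Set.empty then validate_rows rest else false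

-- ===== PORT B =====
-- inner loop of B: 'for a, b in zip(digits, digits[1:]): if a == b: return False'
def pvAdjEq : List Char → Bool
  | a :: b :: rest => if a = b then true else pvAdjEq (b :: rest)
  | _ => false

def validate_rows_alt (board : List String) : Bool :=
  match board with
  | [] => true
  | row :: rest =>
    let digits := PySem.List.sorted (row.toList.filter (fun c => ¬ (c = '*' ∨ c = ' '))) (fun c => c) false
    if pvAdjEq digits then false else validate_rows_alt rest

-- ===== PRECONDITION & SPEC =====
def Spec_validate_rows (board : List String) (out : Bool) : Prop := out = validate_rows_alt board
instance (board : List String) (out : Bool) : Decidable (Spec_validate_rows board out) := by unfold Spec_validate_rows; infer_instance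

-- ===== CLAIM (what is proved, stated in full; the proofs are below) =====
def Claim_equal_validate_rows : Prop := ∀ (board : List String), Dom_validate_rows board → Spec_validate_rows board (validate_rows board)

-- ===== LEMMAS AND PROOFS =====

theorem pvSet_add_of_not_mem {s : PySem.Set Char} {c : Char} (h : c ∉ s) :
    PySem.Set.add s c = s ++ [c] := by
  simp [PySem.Set.add, PySem.Set.contains, h]

theorem pvNodup_append_singleton {s : PySem.Set Char} {c : Char} (hs : s.Nodup) (hc : c ∉ s) :
    (s ++ [c]).Nodup := by
  simp [List.nodup_append, hs]
  intro a ha h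
  exact hc (h ▸ ha)

-- A's inner loop decides nodup of (already seen) ++ (filtered remainder)
theorem pvRowLoopA_eq (cs : List Char) (s : PySem.Set Char) (hs : s.Nodup) :
    pvRowLoopA cs s = decide ((s ++ cs.filter (fun c => ¬ (c = '*' ∨ c = ' '))).Nodup) := by
  induction cs generalizing s with
  | nil => simp [pvRowLoopA, hs]
  | cons c rest ih =>
    by_cases hp : (c = '*' ∨ c = ' ')
    · have hf : List.filter (fun c => decide ¬ (c = '*' ∨ c = ' ')) (c :: rest)
          = List.filter (fun c => decide ¬ (c = '*' ∨ c = ' ')) rest := by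
        rw [List.filter_cons, if_neg]
        simp only [decide_eq_true_eq]
        exact fun h => (not_not_intro hp) h
      rw [hf]
      rw [show pvRowLoopA (c :: rest) s = pvRowLoopA rest s from by
        simp only [pvRowLoopA]; rw [if_neg (not_not_intro hp)]]
      exact ih s hs
    · have hf : List.filter (fun c => decide ¬ (c = '*' ∨ c = ' ')) (c :: rest)
          = c :: List.filter (fun c => decide ¬ (c = '*' ∨ c = ' ')) rest := by
        rw [List.filter_cons, if_pos]
        simp only [decide_eq_true_eq]
        exact hp
      rw [hf]
      by_cases hc : c ∈ s
      · have hct : PySem.Set.contains s c = true := by simp [PySem.Set.contains, hc]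
        have hbad : ¬ (s ++ c :: List.filter (fun c => decide ¬ (c = '*' ∨ c = ' ')) rest).Nodup := by
          intro hnd
          exact (List.disjoint_of_nodup_append hnd) hc (by simp)
        rw [show pvRowLoopA (c :: rest) s = false from by
          simp only [pvRowLoopA]; rw [if_pos hp, hct, if_pos rfl]]
        exact (decide_eq_false hbad).symm
      · have hct : PySem.Set.contains s c = false := by simp [PySem.Set.contains, hc]
        have hnd : (s ++ [c]).Nodup := pvNodup_append_singleton hs hc
        rw [show pvRowLoopA (c :: rest) s = pvRowLoopA rest (PySem.Set.add s c) from by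
          simp only [pvRowLoopA]; rw [if_pos hp, hct, if_neg Bool.false_ne_true]]
        rw [pvSet_add_of_not_mem hc, ih _ hnd, List.append_assoc, List.singleton_append]

-- the adjacent scan is false exactly on chains of pairwise-distinct neighbours
theorem pvAdjEq_false_iff (l : List Char) :
    pvAdjEq l = false ↔ l.IsChain (· ≠ ·) := by
  induction l with
  | nil => simp [pvAdjEq]
  | cons a l ih =>
    cases l with
    | nil => simp [pvAdjEq]
    | cons b rest =>
      by_cases hab : a = b
      · simp [pvAdjEq, hab, List.isChain_cons_cons]
      · rw [show pvAdjEq (a :: b :: rest) = pvAdjEq (b :: rest) from by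
          simp [pvAdjEq, hab]]
        rw [ih, List.isChain_cons_cons]
        tauto

-- on a list sorted by ≤, no equal neighbours ⟺ no duplicates at all
theorem pvAdjEq_false_iff_nodup {l : List Char} (hp : l.Pairwise (· ≤ ·)) :
    pvAdjEq l = false ↔ l.Nodup := by
  rw [pvAdjEq_false_iff]
  constructor
  · intro hc
    have hlt : l.IsChain (· < ·) := by
      have hle : l.IsChain (· ≤ ·) := hp.isChain
      clear hp
      induction l with
      | nil => exact List.isChain_nil
      | cons a l ih =>
        cases l with
        | nil => exact List.isChain_singleton a
        | cons b rest =>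
          rw [List.isChain_cons_cons] at hc hle ⊢
          exact ⟨lt_of_le_of_ne hle.1 hc.1, ih hc.2 hle.2⟩
    exact (List.isChain_iff_pairwise.mp hlt).imp ne_of_lt
  · intro hnd
    exact List.Pairwise.isChain hnd

-- ===== VERDICT (by name: the statement is the Claim_ definition above) =====
theorem validate_rows_spec : Claim_equal_validate_rows := by
  intro board hdom
  unfold Spec_validate_rows
  clear hdom
  induction board with
  | nil => rfl
  | cons row rest ih =>
    rw [show validate_rows (row :: rest)
        = (if pvRowLoopA row.toList PySem.Set.empty then validate_rows rest else false) from rfl]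
    rw [show validate_rows_alt (row :: rest)
        = (if pvAdjEq (PySem.List.sorted (row.toList.filter (fun c => ¬ (c = '*' ∨ c = ' '))) (fun c => c) false)
           then false else validate_rows_alt rest) from rfl]
    rw [pvRowLoopA_eq _ PySem.Set.empty List.nodup_nil]
    set f := row.toList.filter (fun c => ¬ (c = '*' ∨ c = ' ')) with hf
    have hperm : (PySem.List.sorted f (fun c => c) false).Perm f := PySem.List.sorted_perm ..
    have hpw : (PySem.List.sorted f (fun c => c) false).Pairwise (· ≤ ·) := by
      simpa using PySem.List.sorted_pairwise f (fun c => c)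
    have hiff : pvAdjEq (PySem.List.sorted f (fun c => c) false) = false ↔ f.Nodup := by
      rw [pvAdjEq_false_iff_nodup hpw, hperm.nodup_iff]
    by_cases hnd : f.Nodup
    · rw [if_pos (by simpa [PySem.Set.empty] using hnd), ih,
          if_neg (by simp [hiff.mpr hnd])]
    · rw [if_neg (by simpa [PySem.Set.empty] using hnd),
          if_pos (by rcases Bool.eq_false_or_eq_true (pvAdjEq (PySem.List.sorted f (fun c => c) false)) with h | h
                     · exact h
                     · exact absurd (hiff.mp h) hnd)]
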